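-- pv_equiv track=rewrite | github.com/runeape-sats/qmoney | pubkey_hidden_subspace/note_family.py | orthogonal_complement
-- ===== SOURCE A (Python) =====
-- from itertools import product
-- from typing import Dict, Iterable, List, Sequence, Tuple
--
-- Vector = Tuple[int, ...]
--
-- def _dot_mod2(left: Vector, right: Vector) -> int:
--     return sum(a & b for a, b in zip(left, right)) % 2
--
-- def _all_binary_vectors(dimension: int) -> List[Vector]:
--     return [tuple(bits) for bits in product((0, 1), repeat=dimension)]
--
-- def orthogonal_complement(vectors: Sequence[Vector]) -> List[Vector]:
--     if not vectors:
--         return [tuple()]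
--     dimension = len(vectors[0])
--     complement = []
--     for candidate in _all_binary_vectors(dimension):
--         if all(_dot_mod2(candidate, vector) == 0 for vector in vectors):
--             complement.append(candidate)
--     return sorted(complement)
-- ===== SOURCE B (Python) =====
-- def orthogonal_complement(vectors):
--     # Gauss-Jordan over GF(2): compute an RREF basis of the row space, read off a
--     # null-space basis from the free columns, enumerate its span, sort.
--     if not vectors:
--         return [tuple()]
--     n = len(vectors[0])
--     basis_rows = []  # list of (pivot, rref row); rows are 0/1 lists of length n
--     for v in vectors:
--         r = [v[i] % 2 if i < len(v) else 0 for i in range(n)]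
--         for p, br in basis_rows:
--             if r[p] == 1:
--                 r = [(a + b) % 2 for a, b in zip(r, br)]
--         if 1 in r:
--             p = r.index(1)
--             basis_rows = [(q, [(a + b) % 2 for a, b in zip(bq, r)] if bq[p] == 1 else bq)
--                           for q, bq in basis_rows]
--             basis_rows.append((p, r))
--     pivots = [p for p, _ in basis_rows]
--     free = [i for i in range(n) if i not in pivots]
--     nbasis = []
--     for f in free:
--         vec = [0] * n
--         vec[f] = 1
--         for p, br in basis_rows:
--             vec[p] = br[f]
--         nbasis.append(vec)
--     out = []
--     for mask in range(1 << len(nbasis)):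
--         x = [0] * n
--         for k in range(len(nbasis)):
--             if (mask >> k) & 1:
--                 x = [(a + b) % 2 for a, b in zip(x, nbasis[k])]
--         out.append(tuple(x))
--     return sorted(out)
-- ===== Notes on version B (the rewrite author's own statement) =====
-- stated objective: faster
-- what changed: A filters all 2^n binary vectors by testing orthogonality against every input vector; B runs Gauss-Jordan elimination over GF(2) to get an RREF row basis, reads off a null-space basis from the free columns, enumerates only the 2^(n-rank) span elements and sorts them.
import Mathlib
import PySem

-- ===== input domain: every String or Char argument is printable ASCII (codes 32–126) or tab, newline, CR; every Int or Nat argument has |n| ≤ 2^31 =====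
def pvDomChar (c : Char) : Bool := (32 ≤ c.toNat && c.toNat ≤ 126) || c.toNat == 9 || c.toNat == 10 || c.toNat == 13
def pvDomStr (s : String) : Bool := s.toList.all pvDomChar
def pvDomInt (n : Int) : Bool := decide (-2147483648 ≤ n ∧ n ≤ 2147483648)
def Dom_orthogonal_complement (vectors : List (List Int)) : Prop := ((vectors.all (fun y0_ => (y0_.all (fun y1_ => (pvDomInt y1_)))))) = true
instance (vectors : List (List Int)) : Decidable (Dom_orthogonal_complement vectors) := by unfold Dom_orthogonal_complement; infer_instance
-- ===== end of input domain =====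

-- B replaces A's filter over all 2^n binary vectors by GF(2) Gauss-Jordan elimination:
-- an RREF row basis, a null-space basis from the free columns, enumeration of its
-- 2^(n-rank) span elements, then sort (objective: faster, asymptotic).


-- ===== PORT A =====
-- sum(a & b for a, b in zip(left, right)) % 2
def pvDotMod2 (left right : List Int) : Int :=
  PySem.Int.mod (List.zipWith PySem.Int.band left right).sum 2

-- [tuple(bits) for bits in product((0, 1), repeat=dimension)]  (itertools.product as a
-- library call: the lexicographic enumeration, first coordinate slowest — exact)
def pvAllBin : Nat → List (List Int)
  | 0 => [[]]
  | n + 1 => (pvAllBin n).map (List.cons 0) ++ (pvAllBin n).map (List.cons 1)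

def orthogonal_complement (vectors : List (List Int)) : List (List Int) :=
  match vectors with
  | [] => [[]]
  | v0 :: _ =>
      let complement := (pvAllBin v0.length).foldl
        (fun acc candidate =>
          if vectors.all (fun vector => pvDotMod2 candidate vector == 0) then
            acc ++ [candidate]
          else acc) []
      PySem.List.sorted complement (fun x => x) false

-- ===== PORT B =====
-- [v[i] % 2 if i < len(v) else 0 for i in range(n)]  (indices i are in range, so the
-- guarded v.getD is exact for v[i])
def pvRowOf (v : List Int) (n : Nat) : List Int :=
  (List.range n).map (fun i => if i < v.length then PySem.Int.mod (v.getD i 0) 2 else 0)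

-- [(a + b) % 2 for a, b in zip(r, br)]
def pvXor2 (a b : List Int) : List Int :=
  List.zipWith (fun x y => PySem.Int.mod (x + y) 2) a b

-- the inner reduction loop: for p, br in basis_rows: if r[p] == 1: r = xor
def pvReduce (bl : List (Nat × List Int)) (r : List Int) : List Int :=
  bl.foldl (fun r pb => if r.getD pb.1 0 = 1 then pvXor2 r pb.2 else r) r

-- the body of the main loop: reduce r, and if nonzero insert it (clearing its pivot
-- column from the existing rows first); r.index(1) is guarded by 1 ∈ r
def pvInsert (bl : List (Nat × List Int)) (r : List Int) : List (Nat × List Int) :=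
  if (1 : Int) ∈ r then
    let p := (PySem.List.index? r 1).getD 0
    (bl.map (fun qb => (qb.1, if qb.2.getD p 0 = 1 then pvXor2 qb.2 r else qb.2))) ++ [(p, r)]
  else bl

def pvElim (vectors : List (List Int)) (n : Nat) : List (Nat × List Int) :=
  vectors.foldl (fun bl v => pvInsert bl (pvReduce bl (pvRowOf v n))) []

-- vec = [0]*n; vec[f] = 1; for p, br in basis_rows: vec[p] = br[f]
def pvNBasisVec (n : Nat) (bl : List (Nat × List Int)) (f : Nat) : List Int :=
  bl.foldl (fun vec pb => vec.set pb.1 (pb.2.getD f 0)) ((List.replicate n (0 : Int)).set f 1)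

-- x = [0]*n; for k in range(len(nbasis)): if (mask >> k) & 1: x = xor x nbasis[k]
def pvCombo (n : Nat) (nb : List (List Int)) (mask : Nat) : List Int :=
  (List.range nb.length).foldl
    (fun x k => if (mask >>> k) &&& 1 = 1 then pvXor2 x (nb.getD k []) else x)
    (List.replicate n (0 : Int))

def orthogonal_complement_alt (vectors : List (List Int)) : List (List Int) :=
  match vectors with
  | [] => [[]]
  | v0 :: _ =>
      let n := v0.length
      let bl := pvElim vectors n
      let pivots := bl.map Prod.fst
      let free := (List.range n).filter (fun i => ¬ pivots.contains i)
      let nb := free.map (pvNBasisVec n bl)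
      let out := (List.range (2 ^ nb.length)).map (pvCombo n nb)
      PySem.List.sorted out (fun x => x) false

-- ===== PRECONDITION & SPEC =====
def Spec_orthogonal_complement (vectors : List (List Int)) (out : List (List Int)) : Prop := out = orthogonal_complement_alt vectors
instance (vectors : List (List Int)) (out : List (List Int)) : Decidable (Spec_orthogonal_complement vectors out) := by unfold Spec_orthogonal_complement; infer_instance

-- ===== CLAIM (what is proved, stated in full; the proofs are below) =====
def Claim_equal_orthogonal_complement : Prop := ∀ (vectors : List (List Int)), Dom_orthogonal_complement vectors → Spec_orthogonal_complement vectors (orthogonal_complement vectors)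

-- ===== LEMMAS AND PROOFS =====

def nth (x : List Int) (i : Nat) : Int := x.getD i 0

def IsBit (a : Int) : Prop := a = 0 ∨ a = 1

def BV (n : Nat) (x : List Int) : Prop := x.length = n ∧ ∀ i, IsBit (nth x i)

def dotF (n : Nat) (x r : List Int) : Int := ∑ i ∈ Finset.range n, nth x i * nth r i

def SolRows (n : Nat) (vectors : List (List Int)) (x : List Int) : Prop :=
  ∀ v ∈ vectors, (2:Int) ∣ dotF n x (pvRowOf v n)

def SolBL (n : Nat) (bl : List (Nat × List Int)) (x : List Int) : Prop :=
  ∀ pb ∈ bl, (2:Int) ∣ dotF n x pb.2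

def GoodBL (n : Nat) (bl : List (Nat × List Int)) : Prop :=
  (∀ pb ∈ bl, pb.1 < n ∧ pb.2.length = n ∧ (∀ i, IsBit (nth pb.2 i)) ∧ nth pb.2 pb.1 = 1)
  ∧ (∀ pb ∈ bl, ∀ qc ∈ bl, pb.1 ≠ qc.1 → nth qc.2 pb.1 = 0)
  ∧ (bl.map Prod.fst).Nodup

def freeL (n : Nat) (bl : List (Nat × List Int)) : List Nat :=
  (List.range n).filter (fun i => ¬ (bl.map Prod.fst).contains i)

-- basic nth lemmas
theorem nth_eq_getElem (x : List Int) (i : Nat) (h : i < x.length) : nth x i = x[i] :=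
  List.getD_eq_getElem x 0 h

theorem nth_ge (x : List Int) (i : Nat) (h : x.length ≤ i) : nth x i = 0 :=
  List.getD_eq_default x 0 h

theorem pymod2 (a : Int) : PySem.Int.mod a 2 = a % 2 :=
  PySem.Int.mod_eq_emod_of_pos (by norm_num)

theorem isBit_mod2 (a : Int) : IsBit (a % 2) := by unfold IsBit; omega

theorem nth_zipWith (f : Int → Int → Int) (a b : List Int) (i : Nat)
    (ha : i < a.length) (hb : i < b.length) :
    nth (List.zipWith f a b) i = f (nth a i) (nth b i) := by
  have h : i < (List.zipWith f a b).length := by simp [List.length_zipWith]; omega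
  rw [nth_eq_getElem _ _ h, nth_eq_getElem _ _ ha, nth_eq_getElem _ _ hb, List.getElem_zipWith]

theorem length_pvXor2 (a b : List Int) : (pvXor2 a b).length = min a.length b.length := by
  simp [pvXor2]

theorem nth_pvXor2 (a b : List Int) (i : Nat) (ha : i < a.length) (hb : i < b.length) :
    nth (pvXor2 a b) i = (nth a i + nth b i) % 2 := by
  rw [pvXor2, nth_zipWith _ _ _ _ ha hb, pymod2]

theorem length_pvRowOf (v : List Int) (n : Nat) : (pvRowOf v n).length = n := by
  simp [pvRowOf]

theorem nth_pvRowOf (v : List Int) (n i : Nat) (hi : i < n) :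
    nth (pvRowOf v n) i = if i < v.length then nth v i % 2 else 0 := by
  rw [nth, pvRowOf, List.getD_eq_getElem _ _ (by simp [hi])]
  simp [nth]

theorem bit_nth_pvRowOf (v : List Int) (n : Nat) (i : Nat) : IsBit (nth (pvRowOf v n) i) := by
  by_cases hi : i < n
  · rw [nth_pvRowOf v n i hi]
    split
    · exact isBit_mod2 _
    · exact Or.inl rfl
  · rw [nth_ge _ _ (by rw [length_pvRowOf]; omega)]
    exact Or.inl rfl

theorem sum_zipWith (f : Int → Int → Int) : ∀ (x v : List Int),
    (List.zipWith f x v).sum = ∑ i ∈ Finset.range (min x.length v.length), f (nth x i) (nth v i) := by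
  intro x
  induction x with
  | nil => intro v; simp
  | cons a t ih =>
    intro v
    cases v with
    | nil => simp
    | cons b u =>
      have hmin : min (a :: t).length (b :: u).length = min t.length u.length + 1 := by
        simp [Nat.succ_min_succ]
      rw [List.zipWith_cons_cons, List.sum_cons, hmin, Finset.sum_range_succ', ih u]
      simp [nth, add_comm]

theorem dvd_dotF_pvXor2 (n : Nat) (x r b : List Int) (hr : r.length = n) (hb : b.length = n)
    (hdb : (2:Int) ∣ dotF n x b) :
    ((2:Int) ∣ dotF n x (pvXor2 r b) ↔ (2:Int) ∣ dotF n x r) := by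
  have key : (2:Int) ∣ (dotF n x (pvXor2 r b) - dotF n x r - dotF n x b) := by
    unfold dotF
    rw [← Finset.sum_sub_distrib, ← Finset.sum_sub_distrib]
    apply Finset.dvd_sum
    intro i hi
    have hi' : i < n := Finset.mem_range.mp hi
    rw [nth_pvXor2 _ _ _ (by omega) (by omega)]
    have heq : nth x i * ((nth r i + nth b i) % 2) - nth x i * nth r i - nth x i * nth b i
        = ((nth r i + nth b i) % 2 - (nth r i + nth b i)) * nth x i := by ring
    rw [heq]
    exact Dvd.dvd.mul_right (by omega) _
  omega

theorem dotF_zero_right (n : Nat) (x r : List Int) (h : ∀ i, i < n → nth r i = 0) :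
    dotF n x r = 0 := by
  unfold dotF
  apply Finset.sum_eq_zero
  intro i hi
  rw [h i (Finset.mem_range.mp hi)]
  ring

-- GoodBL structural lemmas
theorem goodBL_nil (n : Nat) : GoodBL n [] := by
  refine ⟨?_, ?_, ?_⟩ <;> simp

theorem goodBL_tail (n : Nat) (pb : Nat × List Int) (tl : List (Nat × List Int))
    (h : GoodBL n (pb :: tl)) : GoodBL n tl := by
  obtain ⟨h1, h2, h3⟩ := h
  exact ⟨fun qc hqc => h1 qc (List.mem_cons_of_mem _ hqc),
         fun qc hqc rc hrc => h2 qc (List.mem_cons_of_mem _ hqc) rc (List.mem_cons_of_mem _ hrc),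
         by simpa using h3.of_cons⟩

-- pvReduce


theorem coordzero_pvReduce (n j : Nat) : ∀ (bl : List (Nat × List Int)) (r : List Int),
    (∀ pb ∈ bl, pb.2.length = n ∧ nth pb.2 j = 0) → r.length = n → j < n →
    nth r j = 0 → nth (pvReduce bl r) j = 0 := by
  intro bl
  induction bl with
  | nil => intro r _ _ _ h0; exact h0
  | cons pb tl ih =>
    intro r hbl hr hj h0
    show nth (pvReduce tl (if r.getD pb.1 0 = 1 then pvXor2 r pb.2 else r)) j = 0
    have hpb := hbl pb (List.mem_cons_self ..)
    have hlen : (if r.getD pb.1 0 = 1 then pvXor2 r pb.2 else r).length = n := by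
      split
      · rw [length_pvXor2, hr, hpb.1]; omega
      · exact hr
    apply ih _ (fun qc hqc => hbl qc (List.mem_cons_of_mem _ hqc)) hlen hj
    split
    · rw [nth_pvXor2 _ _ _ (by omega) (by rw [hpb.1]; omega), h0, hpb.2]; norm_num
    · exact h0


-- a packaged version of the reduce facts that the insert step needs
theorem reduce_spec (n : Nat) (bl : List (Nat × List Int)) (r : List Int)
    (hg : GoodBL n bl) (hr : r.length = n) (hb : ∀ i, IsBit (nth r i)) :
    (pvReduce bl r).length = n ∧ (∀ i, IsBit (nth (pvReduce bl r) i)) ∧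
    (∀ pb ∈ bl, nth (pvReduce bl r) pb.1 = 0) ∧
    (∀ x, SolBL n bl x → ((2:Int) ∣ dotF n x (pvReduce bl r) ↔ (2:Int) ∣ dotF n x r)) := by
  induction bl generalizing r with
  | nil =>
    exact ⟨hr, hb, by simp, fun x _ => Iff.rfl⟩
  | cons pb tl ih =>
    obtain ⟨hg1, hg2, hg3⟩ := hg
    have hpb := hg1 pb (List.mem_cons_self ..)
    have hlen : (if r.getD pb.1 0 = 1 then pvXor2 r pb.2 else r).length = n := by
      split
      · rw [length_pvXor2, hr, hpb.2.1]; omega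
      · exact hr
    have hbits : ∀ i, IsBit (nth (if r.getD pb.1 0 = 1 then pvXor2 r pb.2 else r) i) := by
      intro i
      split
      · by_cases hi : i < n
        · rw [nth_pvXor2 _ _ _ (by omega) (by rw [hpb.2.1]; omega)]
          exact isBit_mod2 _
        · rw [nth_ge _ _ (by rw [length_pvXor2, hr, hpb.2.1]; omega)]
          exact Or.inl rfl
      · exact hb i
    have hr1p : nth (if r.getD pb.1 0 = 1 then pvXor2 r pb.2 else r) pb.1 = 0 := by
      rcases hb pb.1 with h0 | h1
      · rw [if_neg (by simp [nth] at h0; simp [h0])]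
        exact h0
      · rw [if_pos (by simpa [nth] using h1),
          nth_pvXor2 _ _ _ (by omega) (by rw [hpb.2.1]; omega), h1, hpb.2.2.2]
        norm_num
    have ihres := ih _ (goodBL_tail n pb tl ⟨hg1, hg2, hg3⟩) hlen hbits
    refine ⟨?_, ?_, ?_, ?_⟩
    · exact ihres.1
    · exact ihres.2.1
    · intro qc hqc
      rcases List.mem_cons.mp hqc with heq | hmem
      · subst heq
        show nth (pvReduce tl _) qc.1 = 0
        apply coordzero_pvReduce n qc.1 tl _ ?_ hlen hpb.1 hr1p
        intro rc hrc
        refine ⟨(hg1 rc (List.mem_cons_of_mem _ hrc)).2.1, ?_⟩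
        apply hg2 qc (List.mem_cons_self ..) rc (List.mem_cons_of_mem _ hrc)
        intro hcontra
        have hnd : qc.1 ∉ tl.map Prod.fst ∧ (tl.map Prod.fst).Nodup := by simpa using hg3
        exact absurd (by rw [hcontra]; exact List.mem_map_of_mem hrc) hnd.1
      · exact ihres.2.2.1 qc hmem
    · intro x hsol
      show (2:Int) ∣ dotF n x (pvReduce tl _) ↔ _
      rw [ihres.2.2.2 x (fun qc hqc => hsol qc (List.mem_cons_of_mem _ hqc))]
      split
      · exact dvd_dotF_pvXor2 n x r pb.2 hr hpb.2.1 (hsol pb (List.mem_cons_self ..))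
      · exact Iff.rfl

-- pvInsert
theorem insert_spec (n : Nat) (bl : List (Nat × List Int)) (r : List Int)
    (hg : GoodBL n bl) (hr : r.length = n) (hb : ∀ i, IsBit (nth r i))
    (hclear : ∀ pb ∈ bl, nth r pb.1 = 0) :
    GoodBL n (pvInsert bl r) ∧
    (∀ x, SolBL n (pvInsert bl r) x ↔ (SolBL n bl x ∧ (2:Int) ∣ dotF n x r)) := by
  obtain ⟨hg1, hg2, hg3⟩ := hg
  by_cases hmem : (1:Int) ∈ r
  · -- r nonzero: a new pivot row is inserted
    obtain ⟨k, hk⟩ : ∃ k, PySem.List.index? r 1 = some k :=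
      Option.isSome_iff_exists.mp ((PySem.List.index?_isSome_iff r 1).mpr hmem)
    obtain ⟨hklt, hkval, -⟩ := PySem.List.getElem_of_index?_eq_some hk
    have hp : (PySem.List.index? r 1).getD 0 = k := by rw [hk]; rfl
    have hunf : pvInsert bl r =
        (bl.map (fun qb => (qb.1, if qb.2.getD k 0 = 1 then pvXor2 qb.2 r else qb.2))) ++ [(k, r)] := by
      simp only [pvInsert, if_pos hmem, hp]
    have hkn : k < n := by omega
    have hrk : nth r k = 1 := by rw [nth_eq_getElem r k hklt]; exact hkval
    have hknotpiv : ∀ pb ∈ bl, pb.1 ≠ k := by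
      intro pb hpb heq
      have := hclear pb hpb
      rw [heq, hrk] at this
      norm_num at this
    -- facts about a transformed old row
    have hsec : ∀ qb ∈ bl,
        ((if qb.2.getD k 0 = 1 then pvXor2 qb.2 r else qb.2).length = n) ∧
        (∀ i, IsBit (nth (if qb.2.getD k 0 = 1 then pvXor2 qb.2 r else qb.2) i)) ∧
        (nth (if qb.2.getD k 0 = 1 then pvXor2 qb.2 r else qb.2) qb.1 = 1) ∧
        (nth (if qb.2.getD k 0 = 1 then pvXor2 qb.2 r else qb.2) k = 0) ∧
        (∀ pb ∈ bl, pb.1 ≠ qb.1 → nth (if qb.2.getD k 0 = 1 then pvXor2 qb.2 r else qb.2) pb.1 = 0) := by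
      intro qb hqb
      obtain ⟨hq1, hq2, hq3, hq4⟩ := hg1 qb hqb
      by_cases hc : qb.2.getD k 0 = 1
      · rw [if_pos hc]
        have hlen : (pvXor2 qb.2 r).length = n := by rw [length_pvXor2, hq2, hr]; omega
        refine ⟨hlen, ?_, ?_, ?_, ?_⟩
        · intro i
          by_cases hi : i < n
          · rw [nth_pvXor2 _ _ _ (by omega) (by omega)]; exact isBit_mod2 _
          · rw [nth_ge _ _ (by omega)]; exact Or.inl rfl
        · rw [nth_pvXor2 _ _ _ (by omega) (by omega), hq4, hclear qb hqb]; norm_num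
        · have hck : nth qb.2 k = 1 := hc
          rw [nth_pvXor2 _ _ _ (by omega) (by omega), hck, hrk]; norm_num
        · intro pb hpb hne
          have h1 : nth qb.2 pb.1 = 0 := hg2 pb hpb qb hqb hne
          have h2 : nth r pb.1 = 0 := hclear pb hpb
          rw [nth_pvXor2 _ _ _ (by rw [hq2]; exact (hg1 pb hpb).1) (by rw [hr]; exact (hg1 pb hpb).1),
            h1, h2]
          norm_num
      · rw [if_neg hc]
        have hck : nth qb.2 k = 0 := by
          rcases hq3 k with h0 | h1
          · exact h0
          · exact absurd h1 hc
        exact ⟨hq2, hq3, hq4, hck, fun pb hpb hne => hg2 pb hpb qb hqb hne⟩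
    rw [hunf]
    constructor
    · -- GoodBL
      refine ⟨?_, ?_, ?_⟩
      · intro pb hpb
        rcases List.mem_append.mp hpb with hml | hmr
        · obtain ⟨qb, hqb, rfl⟩ := List.mem_map.mp hml
          obtain ⟨hq1, -, -, -⟩ := hg1 qb hqb
          obtain ⟨hl, hbits, hpiv, -, -⟩ := hsec qb hqb
          exact ⟨hq1, hl, hbits, hpiv⟩
        · rw [List.mem_singleton.mp hmr]
          exact ⟨hkn, hr, hb, hrk⟩
      · intro pb hpb qc hqc hne
        rcases List.mem_append.mp hpb with hml | hmr
        · obtain ⟨qb, hqb, rfl⟩ := List.mem_map.mp hml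
          rcases List.mem_append.mp hqc with hml2 | hmr2
          · obtain ⟨qb2, hqb2, rfl⟩ := List.mem_map.mp hml2
            exact (hsec qb2 hqb2).2.2.2.2 qb hqb (by simpa using hne)
          · rw [List.mem_singleton.mp hmr2]
            exact hclear qb hqb
        · rw [List.mem_singleton.mp hmr] at hne ⊢
          rcases List.mem_append.mp hqc with hml2 | hmr2
          · obtain ⟨qb2, hqb2, rfl⟩ := List.mem_map.mp hml2
            exact (hsec qb2 hqb2).2.2.2.1
          · exact absurd (congrArg Prod.fst (List.mem_singleton.mp hmr2)).symm (by simpa using hne)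
      · rw [List.map_append, List.map_map]
        have : (Prod.fst ∘ fun qb : Nat × List Int =>
            (qb.1, if qb.2.getD k 0 = 1 then pvXor2 qb.2 r else qb.2)) = Prod.fst := rfl
        rw [this]
        simp only [List.map_cons, List.map_nil]
        rw [List.nodup_append]
        refine ⟨hg3, List.nodup_singleton _, ?_⟩
        intro a ha b hbk
        rw [List.mem_singleton.mp hbk]
        obtain ⟨qb, hqb, rfl⟩ := List.mem_map.mp ha
        exact hknotpiv qb hqb
    · -- solution sets
      intro x
      constructor
      · intro hsol
        have hdr : (2:Int) ∣ dotF n x r := by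
          have := hsol (k, r) (List.mem_append.mpr (Or.inr (List.mem_singleton_self _)))
          exact this
        refine ⟨?_, hdr⟩
        intro qb hqb
        have hnew := hsol (qb.1, if qb.2.getD k 0 = 1 then pvXor2 qb.2 r else qb.2)
          (List.mem_append.mpr (Or.inl (List.mem_map.mpr ⟨qb, hqb, rfl⟩)))
        by_cases hc : qb.2.getD k 0 = 1
        · rw [if_pos hc] at hnew
          exact (dvd_dotF_pvXor2 n x qb.2 r (hg1 qb hqb).2.1 hr hdr).mp hnew
        · rw [if_neg hc] at hnew
          exact hnew
      · rintro ⟨hsol, hdr⟩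
        intro pb hpb
        rcases List.mem_append.mp hpb with hml | hmr
        · obtain ⟨qb, hqb, rfl⟩ := List.mem_map.mp hml
          show (2:Int) ∣ dotF n x (if qb.2.getD k 0 = 1 then pvXor2 qb.2 r else qb.2)
          by_cases hc : qb.2.getD k 0 = 1
          · rw [if_pos hc]
            exact (dvd_dotF_pvXor2 n x qb.2 r (hg1 qb hqb).2.1 hr hdr).mpr (hsol qb hqb)
          · rw [if_neg hc]
            exact hsol qb hqb
        · rw [List.mem_singleton.mp hmr]
          exact hdr
  · -- r reduced to zero: nothing inserted
    have hzero : ∀ i, i < n → nth r i = 0 := by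
      intro i hi
      rcases hb i with h0 | h1
      · exact h0
      · exfalso
        apply hmem
        have hi' : i < r.length := by omega
        have hgi : r[i] = 1 := by rw [← nth_eq_getElem r i hi']; exact h1
        rw [← hgi]
        exact List.getElem_mem hi'
    have hunf0 : pvInsert bl r = bl := by simp [pvInsert, hmem]
    rw [hunf0]
    refine ⟨⟨hg1, hg2, hg3⟩, fun x => ?_⟩
    constructor
    · intro h
      exact ⟨h, by rw [dotF_zero_right n x r hzero]; exact dvd_zero 2⟩
    · intro h
      exact h.1

-- pvElim
theorem elim_go (n : Nat) : ∀ (vs : List (List Int)) (bl : List (Nat × List Int)), GoodBL n bl →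
    GoodBL n (vs.foldl (fun bl v => pvInsert bl (pvReduce bl (pvRowOf v n))) bl) ∧
    (∀ x, SolBL n (vs.foldl (fun bl v => pvInsert bl (pvReduce bl (pvRowOf v n))) bl) x ↔
      (SolBL n bl x ∧ SolRows n vs x)) := by
  intro vs
  induction vs with
  | nil =>
    intro bl hg
    exact ⟨hg, fun x => by simp [SolRows]⟩
  | cons v vs ih =>
    intro bl hg
    have hred := reduce_spec n bl (pvRowOf v n) hg (length_pvRowOf v n) (bit_nth_pvRowOf v n)
    have hins := insert_spec n bl (pvReduce bl (pvRowOf v n)) hg hred.1 hred.2.1 hred.2.2.1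
    have ihres := ih (pvInsert bl (pvReduce bl (pvRowOf v n))) hins.1
    refine ⟨ihres.1, fun x => ?_⟩
    show SolBL n (vs.foldl _ (pvInsert bl (pvReduce bl (pvRowOf v n)))) x ↔ _
    rw [ihres.2 x, hins.2 x]
    constructor
    · rintro ⟨⟨hbl, hdvd⟩, hrows⟩
      refine ⟨hbl, ?_⟩
      intro v' hv'
      rcases List.mem_cons.mp hv' with rfl | hm
      · exact (hred.2.2.2 x hbl).mp hdvd
      · exact hrows v' hm
    · rintro ⟨hbl, hrows⟩
      exact ⟨⟨hbl, (hred.2.2.2 x hbl).mpr (hrows v (List.mem_cons_self ..))⟩,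
        fun v' hv' => hrows v' (List.mem_cons_of_mem _ hv')⟩

theorem elim_spec (n : Nat) (vectors : List (List Int)) :
    GoodBL n (pvElim vectors n) ∧
    (∀ x, SolBL n (pvElim vectors n) x ↔ SolRows n vectors x) := by
  have h := elim_go n vectors [] (goodBL_nil n)
  refine ⟨h.1, fun x => ?_⟩
  have h2 := h.2 x
  simpa [SolBL] using h2

-- free columns
theorem mem_freeL (n : Nat) (bl : List (Nat × List Int)) (i : Nat) :
    i ∈ freeL n bl ↔ (i < n ∧ ∀ pb ∈ bl, pb.1 ≠ i) := by
  simp only [freeL, List.mem_filter, List.mem_range, decide_eq_true_eq,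
    List.contains_iff_mem, List.mem_map]
  constructor
  · rintro ⟨h1, h2⟩
    exact ⟨h1, fun pb hpb heq => h2 ⟨pb, hpb, heq⟩⟩
  · rintro ⟨h1, h2⟩
    exact ⟨h1, fun ⟨pb, hpb, heq⟩ => h2 pb hpb heq⟩

theorem nodup_freeL (n : Nat) (bl : List (Nat × List Int)) : (freeL n bl).Nodup :=
  List.Nodup.filter _ (List.nodup_range)

theorem nth_set_ne (x : List Int) (j : Nat) (a : Int) (i : Nat) (h : j ≠ i) :
    nth (x.set j a) i = nth x i := by
  simp [nth, List.getD_eq_getElem?_getD, List.getElem?_set_ne h]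

theorem nth_set_self (x : List Int) (j : Nat) (a : Int) (h : j < x.length) :
    nth (x.set j a) j = a := by
  simp [nth, List.getD_eq_getElem?_getD, List.getElem?_set_self, h]

theorem length_foldl_set (g : Nat × List Int → Int) :
    ∀ (bl : List (Nat × List Int)) (base : List Int),
    (bl.foldl (fun vec pb => vec.set pb.1 (g pb)) base).length = base.length := by
  intro bl
  induction bl with
  | nil => intro base; rfl
  | cons pb tl ih => intro base; rw [List.foldl_cons, ih, List.length_set]

theorem nth_foldl_set_of_ne (g : Nat × List Int → Int) :
    ∀ (bl : List (Nat × List Int)) (base : List Int) (i : Nat), (∀ pb ∈ bl, pb.1 ≠ i) →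
    nth (bl.foldl (fun vec pb => vec.set pb.1 (g pb)) base) i = nth base i := by
  intro bl
  induction bl with
  | nil => intro base i _; rfl
  | cons pb tl ih =>
    intro base i h
    rw [List.foldl_cons, ih _ _ (fun qc hqc => h qc (List.mem_cons_of_mem _ hqc)),
      nth_set_ne _ _ _ _ (h pb (List.mem_cons_self ..))]

theorem nth_foldl_set_pivot (g : Nat × List Int → Int) :
    ∀ (bl : List (Nat × List Int)) (base : List Int) (pb : Nat × List Int),
    (bl.map Prod.fst).Nodup → pb ∈ bl → pb.1 < base.length →
    nth (bl.foldl (fun vec qb => vec.set qb.1 (g qb)) base) pb.1 = g pb := by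
  intro bl
  induction bl with
  | nil => intro base pb _ hpb _; exact absurd hpb (List.not_mem_nil)
  | cons qc tl ih =>
    intro base pb hnd hpb hlt
    rw [List.foldl_cons]
    rcases List.mem_cons.mp hpb with heq | hm
    · subst heq
      have hnd' : pb.1 ∉ tl.map Prod.fst ∧ (tl.map Prod.fst).Nodup := by simpa using hnd
      rw [nth_foldl_set_of_ne]
      · exact nth_set_self base pb.1 (g pb) hlt
      · intro rc hrc heq2
        exact hnd'.1 (heq2 ▸ List.mem_map_of_mem hrc)
    · have hnd' : qc.1 ∉ tl.map Prod.fst ∧ (tl.map Prod.fst).Nodup := by simpa using hnd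
      exact ih _ pb hnd'.2 hm (by rw [List.length_set]; exact hlt)

theorem nth_nbase (n f i : Nat) (hf : f < n) :
    nth ((List.replicate n (0:Int)).set f 1) i = if i = f then 1 else 0 := by
  by_cases hif : i = f
  · subst hif
    have hlen : i < (List.replicate n (0:Int)).length := by rw [List.length_replicate]; omega
    rw [nth_set_self (List.replicate n (0:Int)) i 1 hlen, if_pos rfl]
  · rw [nth_set_ne (List.replicate n (0:Int)) f 1 i (fun h => hif h.symm), if_neg hif]
    by_cases hi : i < n
    · have hlen : i < (List.replicate n (0:Int)).length := by rw [List.length_replicate]; omega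
      rw [nth_eq_getElem _ _ hlen]
      exact List.getElem_replicate _
    · rw [nth_ge _ _ (by rw [List.length_replicate]; omega)]

theorem nbasis_len (n : Nat) (bl : List (Nat × List Int)) (f : Nat) :
    (pvNBasisVec n bl f).length = n := by
  unfold pvNBasisVec
  rw [length_foldl_set, List.length_set, List.length_replicate]

theorem nth_nbasis_nonpivot (n : Nat) (bl : List (Nat × List Int)) (f i : Nat)
    (h : ∀ pb ∈ bl, pb.1 ≠ i) (hf : f < n) :
    nth (pvNBasisVec n bl f) i = if i = f then 1 else 0 := by
  unfold pvNBasisVec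
  rw [nth_foldl_set_of_ne _ bl _ i h, nth_nbase n f i hf]

theorem nth_nbasis_pivot (n : Nat) (bl : List (Nat × List Int)) (f : Nat) (pb : Nat × List Int)
    (hnd : (bl.map Prod.fst).Nodup) (hpb : pb ∈ bl) (hp : pb.1 < n) :
    nth (pvNBasisVec n bl f) pb.1 = nth pb.2 f := by
  unfold pvNBasisVec
  rw [nth_foldl_set_pivot _ bl _ pb hnd hpb (by rw [List.length_set, List.length_replicate]; omega)]
  rfl

theorem pivot_or_free (n : Nat) (bl : List (Nat × List Int)) (i : Nat) (hi : i < n) :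
    (∃ pb ∈ bl, pb.1 = i) ∨ i ∈ freeL n bl := by
  by_cases h : ∃ pb ∈ bl, pb.1 = i
  · exact Or.inl h
  · right
    rw [mem_freeL]
    push_neg at h
    exact ⟨hi, h⟩

theorem dot_decomp (n : Nat) (bl : List (Nat × List Int)) (hg : GoodBL n bl)
    (pb : Nat × List Int) (hpb : pb ∈ bl) (w : List Int) :
    dotF n w pb.2 = nth w pb.1 +
      ∑ i ∈ Finset.range n, (if ∃ qc ∈ bl, qc.1 = i then 0 else nth w i * nth pb.2 i) := by
  unfold dotF
  have hsplit : ∀ i ∈ Finset.range n,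
      nth w i * nth pb.2 i =
      (if i = pb.1 then nth w pb.1 else 0)
        + (if ∃ qc ∈ bl, qc.1 = i then 0 else nth w i * nth pb.2 i) := by
    intro i _
    by_cases hip : i = pb.1
    · subst hip
      rw [if_pos rfl, if_pos ⟨pb, hpb, rfl⟩, (hg.1 pb hpb).2.2.2]
      ring
    · rw [if_neg hip]
      by_cases hpiv : ∃ qc ∈ bl, qc.1 = i
      · obtain ⟨qc, hqc, rfl⟩ := hpiv
        rw [if_pos ⟨qc, hqc, rfl⟩, hg.2.1 qc hqc pb hpb (fun h => hip h)]
        ring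
      · rw [if_neg hpiv]
        ring
  rw [Finset.sum_congr rfl hsplit, Finset.sum_add_distrib]
  congr 1
  rw [Finset.sum_ite_eq' (Finset.range n) pb.1 (fun _ => nth w pb.1),
    if_pos (Finset.mem_range.mpr (hg.1 pb hpb).1)]

theorem sol_nbasis (n : Nat) (bl : List (Nat × List Int)) (f : Nat)
    (hg : GoodBL n bl) (hf : f ∈ freeL n bl) : SolBL n bl (pvNBasisVec n bl f) := by
  intro pb hpb
  obtain ⟨hfn, hfnp⟩ := (mem_freeL n bl f).mp hf
  rw [dot_decomp n bl hg pb hpb]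
  have hpivval : nth (pvNBasisVec n bl f) pb.1 = nth pb.2 f :=
    nth_nbasis_pivot n bl f pb hg.2.2 hpb (hg.1 pb hpb).1
  have hrest : ∑ i ∈ Finset.range n,
      (if ∃ qc ∈ bl, qc.1 = i then 0 else nth (pvNBasisVec n bl f) i * nth pb.2 i)
      = nth pb.2 f := by
    have hcongr : ∀ i ∈ Finset.range n,
        (if ∃ qc ∈ bl, qc.1 = i then 0 else nth (pvNBasisVec n bl f) i * nth pb.2 i) =
        (if i = f then nth pb.2 f else 0) := by
      intro i _
      by_cases hpiv : ∃ qc ∈ bl, qc.1 = i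
      · obtain ⟨qc, hqc, rfl⟩ := hpiv
        rw [if_pos ⟨qc, hqc, rfl⟩, if_neg (hfnp qc hqc)]
      · rw [if_neg hpiv,
          nth_nbasis_nonpivot n bl f i (by push_neg at hpiv; exact hpiv) hfn]
        by_cases hif : i = f
        · subst hif
          rw [if_pos rfl, if_pos rfl]
          ring
        · rw [if_neg hif, if_neg hif]
          ring
    rw [Finset.sum_congr rfl hcongr,
      Finset.sum_ite_eq' (Finset.range n) f (fun _ => nth pb.2 f),
      if_pos (Finset.mem_range.mpr hfn)]
  rw [hpivval, hrest]
  exact ⟨nth pb.2 f, by ring⟩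

theorem sol_ext (n : Nat) (bl : List (Nat × List Int)) (hg : GoodBL n bl) (y z : List Int)
    (hy : BV n y) (hz : BV n z) (hsy : SolBL n bl y) (hsz : SolBL n bl z)
    (hfree : ∀ i ∈ freeL n bl, nth y i = nth z i) : y = z := by
  apply List.ext_getElem (by rw [hy.1, hz.1])
  intro i hi1 hi2
  have hin : i < n := by rw [hy.1] at hi1; exact hi1
  rw [← nth_eq_getElem _ _ hi1, ← nth_eq_getElem _ _ hi2]
  rcases pivot_or_free n bl i hin with ⟨pb, hpb, rfl⟩ | hf
  · have hSy := hsy pb hpb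
    have hSz := hsz pb hpb
    rw [dot_decomp n bl hg pb hpb] at hSy hSz
    have hsum_eq : ∑ i ∈ Finset.range n, (if ∃ qc ∈ bl, qc.1 = i then 0 else nth y i * nth pb.2 i)
        = ∑ i ∈ Finset.range n, (if ∃ qc ∈ bl, qc.1 = i then 0 else nth z i * nth pb.2 i) := by
      apply Finset.sum_congr rfl
      intro i hi
      by_cases hpiv : ∃ qc ∈ bl, qc.1 = i
      · rw [if_pos hpiv, if_pos hpiv]
      · rw [if_neg hpiv, if_neg hpiv,
          hfree i ((mem_freeL n bl i).mpr ⟨Finset.mem_range.mp hi, by push_neg at hpiv; exact hpiv⟩)]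
    rw [hsum_eq] at hSy
    have hby := hy.2 pb.1
    have hbz := hz.2 pb.1
    unfold IsBit at hby hbz
    omega
  · exact hfree _ hf

-- span enumeration
def comboP (n : Nat) (bl : List (Nat × List Int)) (mask t : Nat) : List Int :=
  (List.range t).foldl
    (fun x k => if (mask >>> k) &&& 1 = 1
      then pvXor2 x (((freeL n bl).map (pvNBasisVec n bl)).getD k []) else x)
    (List.replicate n (0 : Int))

theorem combo_eq_comboP (n : Nat) (bl : List (Nat × List Int)) (mask : Nat) :
    pvCombo n ((freeL n bl).map (pvNBasisVec n bl)) mask = comboP n bl mask (freeL n bl).length := by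
  unfold pvCombo comboP
  rw [List.length_map]

theorem comboP_succ (n : Nat) (bl : List (Nat × List Int)) (mask t : Nat) :
    comboP n bl mask (t+1) =
      (if (mask >>> t) &&& 1 = 1
        then pvXor2 (comboP n bl mask t) (((freeL n bl).map (pvNBasisVec n bl)).getD t [])
        else comboP n bl mask t) := by
  unfold comboP
  rw [List.range_succ, List.foldl_append, List.foldl_cons, List.foldl_nil]

theorem nth_replicate0 (n i : Nat) : nth (List.replicate n (0:Int)) i = 0 := by
  by_cases hi : i < n
  · rw [nth_eq_getElem _ _ (by rw [List.length_replicate]; omega)]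
    exact List.getElem_replicate _
  · rw [nth_ge _ _ (by rw [List.length_replicate]; omega)]

theorem dotF_zero_left (n : Nat) (x r : List Int) (h : ∀ i, i < n → nth x i = 0) :
    dotF n x r = 0 := by
  unfold dotF
  apply Finset.sum_eq_zero
  intro i hi
  rw [h i (Finset.mem_range.mp hi)]
  ring

theorem dotF_comm (n : Nat) (x r : List Int) : dotF n x r = dotF n r x := by
  unfold dotF
  apply Finset.sum_congr rfl
  intro i _
  ring

theorem nodup_getElem_ne {l : List Nat} (h : l.Nodup) {i j : Nat}
    (hi : i < l.length) (hj : j < l.length) (hij : i ≠ j) : l[i] ≠ l[j] := by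
  have hp := List.pairwise_iff_getElem.mp h
  rcases Nat.lt_or_ge i j with hlt | hge
  · exact hp i j hi hj hlt
  · have hlt2 : j < i := by omega
    exact (hp j i hj hi hlt2).symm

theorem and_one_le_one (m k : Nat) : (m >>> k) &&& 1 ≤ 1 := Nat.and_le_right

theorem comboP_props (n : Nat) (bl : List (Nat × List Int)) (hg : GoodBL n bl) (mask : Nat) :
    ∀ t, t ≤ (freeL n bl).length →
    (comboP n bl mask t).length = n ∧ (∀ i, IsBit (nth (comboP n bl mask t) i)) ∧
    SolBL n bl (comboP n bl mask t) ∧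
    (∀ j (hj : j < (freeL n bl).length),
      nth (comboP n bl mask t) ((freeL n bl)[j]) =
        if j < t then (((mask >>> j) &&& 1 : Nat) : Int) else 0) := by
  intro t
  induction t with
  | zero =>
    intro _
    refine ⟨by simp [comboP], fun i => by rw [show comboP n bl mask 0 = List.replicate n 0 from rfl, nth_replicate0]; exact Or.inl rfl, ?_, ?_⟩
    · intro pb _
      rw [show comboP n bl mask 0 = List.replicate n 0 from rfl,
        dotF_zero_left n _ _ (fun i _ => nth_replicate0 n i)]
      exact dvd_zero 2
    · intro j hj
      rw [show comboP n bl mask 0 = List.replicate n 0 from rfl, nth_replicate0]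
      simp
  | succ t ih =>
    intro ht
    obtain ⟨ihl, ihb, ihs, ihc⟩ := ih (by omega)
    have htK : t < (freeL n bl).length := by omega
    have hft : (freeL n bl)[t] ∈ freeL n bl := List.getElem_mem htK
    obtain ⟨hftn, hftnp⟩ := (mem_freeL n bl _).mp hft
    have hnbt : ((freeL n bl).map (pvNBasisVec n bl)).getD t [] =
        pvNBasisVec n bl ((freeL n bl)[t]) := by
      rw [List.getD_eq_getElem _ _ (by rw [List.length_map]; omega), List.getElem_map]
    rw [comboP_succ]
    by_cases hbit : (mask >>> t) &&& 1 = 1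
    · rw [if_pos hbit, hnbt]
      have hvlen : (pvNBasisVec n bl ((freeL n bl)[t])).length = n := nbasis_len n bl _
      have hxlen : (pvXor2 (comboP n bl mask t) (pvNBasisVec n bl ((freeL n bl)[t]))).length = n := by
        rw [length_pvXor2, ihl, hvlen]; omega
      refine ⟨hxlen, ?_, ?_, ?_⟩
      · intro i
        by_cases hi : i < n
        · rw [nth_pvXor2 _ _ _ (by omega) (by omega)]
          exact isBit_mod2 _
        · rw [nth_ge _ _ (by omega)]
          exact Or.inl rfl
      · intro pb hpb
        rw [dotF_comm]
        rw [dvd_dotF_pvXor2 n pb.2 (comboP n bl mask t) (pvNBasisVec n bl ((freeL n bl)[t])) ihl hvlen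
          (by rw [← dotF_comm]; exact sol_nbasis n bl _ hg hft pb hpb)]
        rw [← dotF_comm]
        exact ihs pb hpb
      · intro j hj
        have hfjn : (freeL n bl)[j] < n := ((mem_freeL n bl _).mp (List.getElem_mem hj)).1
        rw [nth_pvXor2 _ _ _ (by omega) (by omega), ihc j hj]
        rcases Nat.lt_trichotomy j t with hjt | hjt | hjt
        · have hv : nth (pvNBasisVec n bl ((freeL n bl)[t])) ((freeL n bl)[j]) = 0 := by
            rw [nth_nbasis_nonpivot n bl _ _ (((mem_freeL n bl _).mp (List.getElem_mem hj)).2) hftn,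
              if_neg (nodup_getElem_ne (nodup_freeL n bl) hj htK (by omega))]
          rw [hv, if_pos hjt, if_pos (by omega : j < t + 1)]
          have hle := and_one_le_one mask j
          push_cast
          omega
        · subst hjt
          have hv : nth (pvNBasisVec n bl ((freeL n bl)[j])) ((freeL n bl)[j]) = 1 := by
            rw [nth_nbasis_nonpivot n bl _ _ (((mem_freeL n bl _).mp (List.getElem_mem hj)).2) hftn,
              if_pos rfl]
          rw [hv, if_neg (by omega : ¬ j < j), if_pos (by omega : j < j + 1), hbit]
          norm_num
        · have hv : nth (pvNBasisVec n bl ((freeL n bl)[t])) ((freeL n bl)[j]) = 0 := by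
            rw [nth_nbasis_nonpivot n bl _ _ (((mem_freeL n bl _).mp (List.getElem_mem hj)).2) hftn,
              if_neg (nodup_getElem_ne (nodup_freeL n bl) hj htK (by omega))]
          rw [hv, if_neg (by omega : ¬ j < t), if_neg (by omega : ¬ j < t + 1)]
          norm_num
    · rw [if_neg hbit]
      refine ⟨ihl, ihb, ihs, ?_⟩
      intro j hj
      rw [ihc j hj]
      rcases Nat.lt_trichotomy j t with hjt | hjt | hjt
      · rw [if_pos hjt, if_pos (by omega : j < t + 1)]
      · subst hjt
        rw [if_neg (by omega : ¬ j < j), if_pos (by omega : j < j + 1)]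
        have hle := and_one_le_one mask j
        have hz : (mask >>> j) &&& 1 = 0 := by omega
        rw [hz]
        norm_num
      · rw [if_neg (by omega : ¬ j < t), if_neg (by omega : ¬ j < t + 1)]

theorem combo_props (n : Nat) (bl : List (Nat × List Int)) (hg : GoodBL n bl) (mask : Nat) :
    BV n (pvCombo n ((freeL n bl).map (pvNBasisVec n bl)) mask) ∧
    SolBL n bl (pvCombo n ((freeL n bl).map (pvNBasisVec n bl)) mask) ∧
    (∀ j (hj : j < (freeL n bl).length),
      nth (pvCombo n ((freeL n bl).map (pvNBasisVec n bl)) mask) ((freeL n bl)[j]) =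
        (((mask >>> j) &&& 1 : Nat) : Int)) := by
  obtain ⟨hl, hb, hs, hc⟩ := comboP_props n bl hg mask (freeL n bl).length (le_refl _)
  rw [combo_eq_comboP]
  refine ⟨⟨hl, hb⟩, hs, ?_⟩
  intro j hj
  rw [hc j hj, if_pos hj]

-- encoding the free coordinates of a solution as a mask
def maskOf (x : List Int) (fs : List Nat) : Nat :=
  fs.foldr (fun f acc => 2 * acc + (nth x f).toNat) 0

theorem maskOf_lt (x : List Int) : ∀ fs : List Nat, (∀ f ∈ fs, IsBit (nth x f)) →
    maskOf x fs < 2 ^ fs.length := by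
  intro fs
  induction fs with
  | nil => intro _; norm_num [maskOf]
  | cons f fs ih =>
    intro h
    have hb : (nth x f).toNat ≤ 1 := by
      rcases h f (List.mem_cons_self ..) with h0 | h1
      · rw [h0]; norm_num
      · rw [h1]; norm_num
    have := ih (fun g hg => h g (List.mem_cons_of_mem _ hg))
    show 2 * maskOf x fs + (nth x f).toNat < 2 ^ (fs.length + 1)
    rw [pow_succ]
    omega

theorem shiftR_two_mul_add (a b j : Nat) (hb : b ≤ 1) :
    (2 * a + b) >>> (j + 1) = a >>> j := by
  have h2 : (2 * a + b) / 2 = a := by omega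
  calc (2 * a + b) >>> (j + 1) = (2 * a + b) / 2 ^ (j + 1) := by
        rw [Nat.shiftRight_eq_div_pow]
    _ = (2 * a + b) / (2 * 2 ^ j) := by rw [pow_succ']
    _ = (2 * a + b) / 2 / 2 ^ j := by rw [Nat.div_div_eq_div_mul]
    _ = a / 2 ^ j := by rw [h2]
    _ = a >>> j := by rw [Nat.shiftRight_eq_div_pow]

theorem maskOf_bit (x : List Int) : ∀ (fs : List Nat), (∀ f ∈ fs, IsBit (nth x f)) →
    ∀ j (hj : j < fs.length), ((maskOf x fs) >>> j) &&& 1 = (nth x fs[j]).toNat := by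
  intro fs
  induction fs with
  | nil => intro _ j hj; simp at hj
  | cons f fs ih =>
    intro h j hj
    have hb : (nth x f).toNat ≤ 1 := by
      rcases h f (List.mem_cons_self ..) with h0 | h1
      · rw [h0]; norm_num
      · rw [h1]; norm_num
    have hunf : maskOf x (f :: fs) = 2 * maskOf x fs + (nth x f).toNat := rfl
    cases j with
    | zero =>
      rw [List.getElem_cons_zero, Nat.shiftRight_zero, hunf, Nat.and_one_is_mod]
      omega
    | succ j =>
      rw [List.getElem_cons_succ, hunf, shiftR_two_mul_add _ _ _ hb]
      exact ih (fun g hg => h g (List.mem_cons_of_mem _ hg)) j (by simpa using hj)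

theorem maskOf_eq (x : List Int) : ∀ (fs : List Nat) (mask : Nat), mask < 2 ^ fs.length →
    (∀ j (hj : j < fs.length), nth x fs[j] = (((mask >>> j) &&& 1 : Nat) : Int)) →
    maskOf x fs = mask := by
  intro fs
  induction fs with
  | nil =>
    intro mask hlt _
    simp at hlt
    simp [maskOf, hlt]
  | cons f fs ih =>
    intro mask hlt h
    have h0 : nth x f = ((mask &&& 1 : Nat) : Int) := by
      have := h 0 (by simp)
      rwa [List.getElem_cons_zero, Nat.shiftRight_zero] at this
    have htail : ∀ j (hj : j < fs.length), nth x fs[j] = ((((mask / 2) >>> j) &&& 1 : Nat) : Int) := by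
      intro j hj
      have := h (j+1) (by simp; omega)
      rw [List.getElem_cons_succ] at this
      rwa [show mask >>> (j+1) = (mask / 2) >>> j from by
        rw [Nat.add_comm, Nat.shiftRight_add, Nat.shiftRight_one]] at this
    have hlt2 : mask / 2 < 2 ^ fs.length := by
      rw [List.length_cons, pow_succ] at hlt
      omega
    have hih := ih (mask / 2) hlt2 htail
    show 2 * maskOf x fs + (nth x f).toNat = mask
    rw [hih]
    have hm1 : (nth x f).toNat = mask % 2 := by
      rw [h0, Int.toNat_natCast, Nat.and_one_is_mod]
    omega

theorem bit_cast_toNat (a : Int) (h : IsBit a) : ((a.toNat : Nat) : Int) = a := by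
  rcases h with h0 | h1
  · rw [h0]; rfl
  · rw [h1]; rfl

theorem mem_out (n : Nat) (bl : List (Nat × List Int)) (hg : GoodBL n bl) (x : List Int) :
    x ∈ (List.range (2 ^ ((freeL n bl).map (pvNBasisVec n bl)).length)).map
        (pvCombo n ((freeL n bl).map (pvNBasisVec n bl))) ↔ (BV n x ∧ SolBL n bl x) := by
  rw [List.mem_map]
  constructor
  · rintro ⟨mask, -, rfl⟩
    exact ⟨(combo_props n bl hg mask).1, (combo_props n bl hg mask).2.1⟩
  · rintro ⟨hbv, hsol⟩
    have hbits : ∀ f ∈ freeL n bl, IsBit (nth x f) := fun f _ => hbv.2 f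
    refine ⟨maskOf x (freeL n bl), ?_, ?_⟩
    · rw [List.mem_range, List.length_map]
      exact maskOf_lt x (freeL n bl) hbits
    · -- the combination with x's free coordinates equals x
      apply sol_ext n bl hg _ x
        ⟨(combo_props n bl hg (maskOf x (freeL n bl))).1.1, (combo_props n bl hg _).1.2⟩ hbv
        ((combo_props n bl hg _).2.1) hsol
      intro i hi
      obtain ⟨j, hj, rfl⟩ := List.mem_iff_getElem.mp hi
      rw [(combo_props n bl hg _).2.2 j hj, maskOf_bit x (freeL n bl) hbits j hj,
        bit_cast_toNat _ (hbv.2 _)]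

theorem nodup_out (n : Nat) (bl : List (Nat × List Int)) (hg : GoodBL n bl) :
    ((List.range (2 ^ ((freeL n bl).map (pvNBasisVec n bl)).length)).map
      (pvCombo n ((freeL n bl).map (pvNBasisVec n bl)))).Nodup := by
  apply List.Nodup.map_on ?_ (List.nodup_range)
  intro m1 hm1 m2 hm2 heq
  rw [List.mem_range, List.length_map] at hm1 hm2
  have h1 : maskOf (pvCombo n ((freeL n bl).map (pvNBasisVec n bl)) m1) (freeL n bl) = m1 :=
    maskOf_eq _ (freeL n bl) m1 hm1 (fun j hj => (combo_props n bl hg m1).2.2 j hj)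
  have h2 : maskOf (pvCombo n ((freeL n bl).map (pvNBasisVec n bl)) m2) (freeL n bl) = m2 :=
    maskOf_eq _ (freeL n bl) m2 hm2 (fun j hj => (combo_props n bl hg m2).2.2 j hj)
  rw [← h1, ← h2, heq]

-- A-side: the list of all binary vectors
theorem mem_pvAllBin : ∀ (n : Nat) (x : List Int),
    x ∈ pvAllBin n ↔ (x.length = n ∧ ∀ a ∈ x, IsBit a) := by
  intro n
  induction n with
  | zero =>
    intro x
    simp only [pvAllBin, List.mem_singleton]
    constructor
    · rintro rfl
      exact ⟨rfl, by simp⟩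
    · rintro ⟨hl, -⟩
      exact List.eq_nil_of_length_eq_zero hl
  | succ m ih =>
    intro x
    simp only [pvAllBin, List.mem_append, List.mem_map]
    constructor
    · rintro (⟨t, ht, rfl⟩ | ⟨t, ht, rfl⟩)
      · obtain ⟨hl, hb⟩ := (ih t).mp ht
        refine ⟨by simp [hl], ?_⟩
        intro a ha
        rcases List.mem_cons.mp ha with rfl | h
        · exact Or.inl rfl
        · exact hb a h
      · obtain ⟨hl, hb⟩ := (ih t).mp ht
        refine ⟨by simp [hl], ?_⟩
        intro a ha
        rcases List.mem_cons.mp ha with rfl | h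
        · exact Or.inr rfl
        · exact hb a h
    · rintro ⟨hl, hb⟩
      cases x with
      | nil => simp at hl
      | cons a t =>
        have hlt : t.length = m := by simpa using hl
        have hbt : ∀ b ∈ t, IsBit b := fun b hb' => hb b (List.mem_cons_of_mem _ hb')
        rcases hb a (List.mem_cons_self ..) with rfl | rfl
        · exact Or.inl ⟨t, (ih t).mpr ⟨hlt, hbt⟩, rfl⟩
        · exact Or.inr ⟨t, (ih t).mpr ⟨hlt, hbt⟩, rfl⟩

theorem nodup_pvAllBin : ∀ n : Nat, (pvAllBin n).Nodup := by
  intro n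
  induction n with
  | zero => simp [pvAllBin]
  | succ m ih =>
    show ((pvAllBin m).map (List.cons 0) ++ (pvAllBin m).map (List.cons 1)).Nodup
    apply List.Nodup.append
    · exact ih.map (fun a b h => by simpa using h)
    · exact ih.map (fun a b h => by simpa using h)
    · intro x hx0 hx1
      obtain ⟨t, -, rfl⟩ := List.mem_map.mp hx0
      obtain ⟨s, -, heq⟩ := List.mem_map.mp hx1
      simp at heq

theorem BV_iff (n : Nat) (x : List Int) :
    BV n x ↔ (x.length = n ∧ ∀ a ∈ x, IsBit a) := by
  constructor
  · rintro ⟨hl, hb⟩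
    refine ⟨hl, fun a ha => ?_⟩
    obtain ⟨i, hi, rfl⟩ := List.mem_iff_getElem.mp ha
    rw [← nth_eq_getElem _ _ hi]
    exact hb i
  · rintro ⟨hl, hb⟩
    refine ⟨hl, fun i => ?_⟩
    by_cases hi : i < x.length
    · rw [nth_eq_getElem _ _ hi]
      exact hb _ (List.getElem_mem hi)
    · rw [nth_ge _ _ (by omega)]
      exact Or.inl rfl

theorem dotA_eq (n : Nat) (x v : List Int) (hx : BV n x) :
    (List.zipWith PySem.Int.band x v).sum = dotF n x (pvRowOf v n) := by
  rw [sum_zipWith]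
  have hxl : x.length = n := hx.1
  unfold dotF
  have hsub : Finset.range (min x.length v.length) ⊆ Finset.range n := by
    intro k hk
    rw [Finset.mem_range] at hk ⊢
    have hmle := Nat.min_le_left x.length v.length
    omega
  have h1 : ∀ i ∈ Finset.range (min x.length v.length),
      PySem.Int.band (nth x i) (nth v i) = nth x i * nth (pvRowOf v n) i := by
    intro i hi
    have hi' := Finset.mem_range.mp hi
    have hin : i < n := by
      have hh := lt_of_lt_of_le hi' (Nat.min_le_left x.length v.length)
      omega
    rw [nth_pvRowOf v n i hin, if_pos (lt_of_lt_of_le hi' (Nat.min_le_right _ _))]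
    rcases hx.2 i with h0 | h1
    · rw [h0, PySem.Int.band_comm, PySem.Int.band_zero]
      ring
    · rw [h1, PySem.Int.band_comm, PySem.Int.band_one, pymod2]
      ring
  rw [Finset.sum_congr rfl h1]
  apply Finset.sum_subset hsub
  intro i hi hni
  have hin := Finset.mem_range.mp hi
  rw [Finset.mem_range] at hni
  have hvi : v.length ≤ i := by
    rcases Nat.lt_or_ge i v.length with h | h
    · exact absurd (Nat.lt_min.mpr ⟨by omega, h⟩) hni
    · exact h
  rw [nth_pvRowOf v n i hin, if_neg (by omega)]
  ring

theorem condA_iff (n : Nat) (vectors : List (List Int)) (x : List Int) (hx : BV n x) :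
    ((vectors.all (fun v => pvDotMod2 x v == 0)) = true) ↔ SolRows n vectors x := by
  rw [List.all_eq_true]
  unfold SolRows
  constructor
  · intro h v hv
    have hc := h v hv
    rw [beq_iff_eq] at hc
    unfold pvDotMod2 at hc
    rw [pymod2, dotA_eq n x v hx] at hc
    exact Int.dvd_of_emod_eq_zero hc
  · intro h v hv
    rw [beq_iff_eq]
    unfold pvDotMod2
    rw [pymod2, dotA_eq n x v hx]
    exact Int.emod_eq_zero_of_dvd (h v hv)

theorem foldl_append_filter {α : Type} (p : α → Bool) :
    ∀ (l acc : List α),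
    l.foldl (fun acc c => if p c then acc ++ [c] else acc) acc = acc ++ l.filter p := by
  intro l
  induction l with
  | nil => intro acc; simp
  | cons a t ih =>
    intro acc
    rw [List.foldl_cons]
    by_cases hp : p a
    · rw [if_pos hp, ih, List.filter_cons_of_pos hp, List.append_assoc, List.singleton_append]
    · rw [if_neg hp, ih, List.filter_cons_of_neg hp]

theorem main_cons (v0 : List Int) (vs : List (List Int)) :
    orthogonal_complement (v0 :: vs) = orthogonal_complement_alt (v0 :: vs) := by
  have hA : orthogonal_complement (v0 :: vs) =
      PySem.List.sorted ((pvAllBin v0.length).filter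
        (fun candidate => (v0 :: vs).all (fun vector => pvDotMod2 candidate vector == 0)))
        (fun x => x) false := by
    show PySem.List.sorted ((pvAllBin v0.length).foldl
      (fun acc candidate =>
        if (v0 :: vs).all (fun vector => pvDotMod2 candidate vector == 0) then
          acc ++ [candidate]
        else acc) []) (fun x => x) false = _
    rw [foldl_append_filter, List.nil_append]
  have hB : orthogonal_complement_alt (v0 :: vs) =
      PySem.List.sorted
        ((List.range (2 ^ ((freeL v0.length (pvElim (v0 :: vs) v0.length)).map
            (pvNBasisVec v0.length (pvElim (v0 :: vs) v0.length))).length)).map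
          (pvCombo v0.length ((freeL v0.length (pvElim (v0 :: vs) v0.length)).map
            (pvNBasisVec v0.length (pvElim (v0 :: vs) v0.length)))))
        (fun x => x) false := rfl
  rw [hA, hB]
  have hg := (elim_spec v0.length (v0 :: vs)).1
  have hsol := (elim_spec v0.length (v0 :: vs)).2
  have hmemiff : ∀ a, (a ∈ (pvAllBin v0.length).filter
      (fun candidate => (v0 :: vs).all (fun vector => pvDotMod2 candidate vector == 0))) ↔
      a ∈ (List.range (2 ^ ((freeL v0.length (pvElim (v0 :: vs) v0.length)).map
          (pvNBasisVec v0.length (pvElim (v0 :: vs) v0.length))).length)).map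
        (pvCombo v0.length ((freeL v0.length (pvElim (v0 :: vs) v0.length)).map
          (pvNBasisVec v0.length (pvElim (v0 :: vs) v0.length)))) := by
    intro a
    rw [List.mem_filter, mem_out v0.length _ hg a]
    constructor
    · rintro ⟨hmem, hcond⟩
      have hbv : BV v0.length a := (BV_iff v0.length a).mpr ((mem_pvAllBin v0.length a).mp hmem)
      exact ⟨hbv, (hsol a).mpr ((condA_iff v0.length (v0 :: vs) a hbv).mp hcond)⟩
    · rintro ⟨hbv, hsolbl⟩
      exact ⟨(mem_pvAllBin v0.length a).mpr ((BV_iff v0.length a).mp hbv),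
        (condA_iff v0.length (v0 :: vs) a hbv).mpr ((hsol a).mp hsolbl)⟩
  have hperm := (List.perm_ext_iff_of_nodup
    ((nodup_pvAllBin v0.length).filter _)
    (nodup_out v0.length (pvElim (v0 :: vs) v0.length) hg)).mpr hmemiff
  have hmain := PySem.List.sorted_eq_sorted_of_perm _ _ (fun x : List Int => x)
    (fun a b h => h) hperm
  have hdec : (fun (a b : List Int) => List.decidableLT a b) =
      @LinearOrder.toDecidableLT (List Int) List.instLinearOrder := by
    funext a b
    exact Subsingleton.elim _ _
  rw [hdec]
  exact hmain

-- ===== VERDICT (by name: the statement is the Claim_ definition above) =====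
theorem orthogonal_complement_spec : Claim_equal_orthogonal_complement := by
  intro vectors _
  show orthogonal_complement vectors = orthogonal_complement_alt vectors
  cases vectors with
  | nil => rfl
  | cons v0 vs => exact main_cons v0 vs
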